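-- pv_equiv track=rewrite | github.com/FOXAYA/alx-higher_level_programming | 0x08-python-more_classes/101-nqueens.py | remaining_positions
-- ===== SOURCE A (Python) =====
-- import itertools
--
-- def remaining_positions(board, size):
--     """
--     This function looks at the current state of the board, and determines
--     which positions are still available for placing the next queen.
--     If the board is empty, then every position is available!
--
--     Args:
--         board (frozenset): The set of (x, y) tuples where queens have
--             already been placed on the board. To represent an empty board,
--             pass an empty set.
--         size (int): The number of rows and columns this board has.
--
--     Returns:
--         generator: A generator of (x, y) positions, where each position
--             does not conflict with any existing queen on the board.
--     """
--     # There can only be one queen per row.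
--     # Generate all rows, and remove the ones that are taken.
--     taken_rows = frozenset(x for x, y in board)
--     free_rows = (x for x in range(size) if x not in taken_rows)
--     # There can only be one queen per column.
--     # Generate all columns, and remove the ones that are taken.
--     taken_columns = frozenset(y for x, y in board)
--     free_columns = (y for y in range(size) if y not in taken_columns)
--     # Make a generator of positions that have free rows and free columns.
--     free_row_col = itertools.product(free_rows, free_columns)
--     # There can only be one queen per diagonal, in either direction.
--     # There are two kinds of diagonals:
--     # bottom left to top right, and top left to bottom right.
--     # By adding together the two coordinates of the position,
--     # we get a number that corresponds to the first kind of diagonal.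
--     taken_first_diagonals = frozenset(x + y for x, y in board)
--     # By subtracting one coordinate from the other,
--     # we get a number that corresponds to the second kind of diagonal.
--     taken_second_diagonals = frozenset(x - y for x, y in board)
--     # Return a new generator that filters out the positions
--     # that conflict with existing queens on either diagonal.
--     return (
--         (x, y) for x, y in free_row_col
--         if x + y not in taken_first_diagonals
--         and x - y not in taken_second_diagonals
--     )
-- ===== SOURCE B (Python) =====
-- def remaining_positions(board, size):
--     """Same positions in the same order, found by scanning the board per
--     candidate square instead of precomputing taken-row/column/diagonal sets."""
--     return (
--         (x, y)
--         for x in range(size)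
--         for y in range(size)
--         if all(qx != x and qy != y and qx + qy != x + y and qx - qy != x - y
--                for qx, qy in board)
--     )
-- ===== Notes on version B (the rewrite author's own statement) =====
-- stated objective: simpler
-- what changed: Replaces the four precomputed frozensets, the two filtered generators and itertools.product with a single nested generator expression that checks every placed queen directly against each candidate square.
import Mathlib
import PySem

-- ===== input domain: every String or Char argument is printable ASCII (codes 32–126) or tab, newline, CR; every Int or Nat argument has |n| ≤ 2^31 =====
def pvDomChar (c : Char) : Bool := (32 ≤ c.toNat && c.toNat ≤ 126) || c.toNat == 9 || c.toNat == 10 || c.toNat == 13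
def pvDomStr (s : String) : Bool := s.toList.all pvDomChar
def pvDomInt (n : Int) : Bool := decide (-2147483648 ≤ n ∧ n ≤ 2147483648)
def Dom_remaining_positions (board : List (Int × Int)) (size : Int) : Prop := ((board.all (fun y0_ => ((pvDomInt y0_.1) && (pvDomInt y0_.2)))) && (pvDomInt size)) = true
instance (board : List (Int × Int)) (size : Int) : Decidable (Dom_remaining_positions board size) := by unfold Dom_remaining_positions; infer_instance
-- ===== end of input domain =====

-- B replaces the precomputed taken-row/column/diagonal frozensets and itertools.product
-- with one nested scan that checks every placed queen directly per candidate square (simpler, not faster).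
-- Both Pythons return generators; the equivalence is about the sequence of yielded positions.

-- ===== PORT A =====
def remaining_positions (board : List (Int × Int)) (size : Int) : List (Int × Int) :=
  let takenRows : PySem.Set Int := PySem.Set.ofList (board.map (fun q => q.1))
  let freeRows := (PySem.List.pyRange 0 size 1).filter (fun x => !(PySem.Set.contains takenRows x))
  let takenColumns : PySem.Set Int := PySem.Set.ofList (board.map (fun q => q.2))
  let freeColumns := (PySem.List.pyRange 0 size 1).filter (fun y => !(PySem.Set.contains takenColumns y))
  let freeRowCol := freeRows.flatMap (fun x => freeColumns.map (fun y => (x, y)))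
  let takenFirstDiagonals : PySem.Set Int := PySem.Set.ofList (board.map (fun q => q.1 + q.2))
  let takenSecondDiagonals : PySem.Set Int := PySem.Set.ofList (board.map (fun q => q.1 - q.2))
  freeRowCol.filter (fun p =>
    !(PySem.Set.contains takenFirstDiagonals (p.1 + p.2)) &&
    !(PySem.Set.contains takenSecondDiagonals (p.1 - p.2)))


-- ===== PORT B =====
def noConflict (board : List (Int × Int)) (x y : Int) : Bool :=
  board.all (fun q => q.1 != x && q.2 != y && q.1 + q.2 != x + y && q.1 - q.2 != x - y)

def remaining_positions_alt (board : List (Int × Int)) (size : Int) : List (Int × Int) :=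
  (PySem.List.pyRange 0 size 1).flatMap (fun x =>
    ((PySem.List.pyRange 0 size 1).filter (fun y => noConflict board x y)).map (fun y => (x, y)))


-- ===== PRECONDITION & SPEC =====
def Spec_remaining_positions (board : List (Int × Int)) (size : Int) (out : List (Int × Int)) : Prop := out = remaining_positions_alt board size
instance (board : List (Int × Int)) (size : Int) (out : List (Int × Int)) : Decidable (Spec_remaining_positions board size out) := by unfold Spec_remaining_positions; infer_instance

-- ===== CLAIM (what is proved, stated in full; the proofs are below) =====
def Claim_equal_remaining_positions : Prop := ∀ (board : List (Int × Int)) (size : Int), Dom_remaining_positions board size → Spec_remaining_positions board size (remaining_positions board size)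

-- ===== LEMMAS AND PROOFS =====
lemma flatMap_filter_left (l : List Int) (q : Int → Bool) (g : Int → List (Int × Int)) :
    (l.filter q).flatMap g = l.flatMap (fun x => if q x then g x else []) := by
  induction l with
  | nil => rfl
  | cons a t ih => simp only [List.filter_cons, List.flatMap_cons]; split <;> simp [ih]

lemma notContains_ofList_map (l : List (Int × Int)) (f : Int × Int → Int) (x : Int) :
    (!(PySem.Set.contains (PySem.Set.ofList (l.map f)) x)) = l.all (fun q => f q != x) := by
  rw [Bool.eq_iff_iff]
  simp only [Bool.not_eq_true', List.all_eq_true, bne_iff_ne, ne_eq]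
  simp [pysem]


-- ===== VERDICT (by name: the statement is the Claim_ definition above) =====
theorem remaining_positions_spec : Claim_equal_remaining_positions := by
  intro board size _
  unfold Spec_remaining_positions
  unfold remaining_positions remaining_positions_alt
  simp only [List.filter_flatMap, List.filter_map]
  rw [flatMap_filter_left]
  refine congrArg (fun f => List.flatMap f (PySem.List.pyRange 0 size)) (funext fun x => ?_)
  by_cases h : board.all (fun q => q.1 != x)
  · rw [if_pos (by rw [notContains_ofList_map]; exact h)]
    refine congrArg _ ?_
    rw [List.filter_filter]
    refine List.filter_congr fun y _ => ?_
    unfold noConflict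
    simp only [notContains_ofList_map, Function.comp]
    rw [Bool.eq_iff_iff]
    simp only [List.all_eq_true, Bool.and_eq_true]
    simp only [List.all_eq_true] at h
    constructor
    · intro hh q hq
      exact ⟨⟨⟨h q hq, (hh.2) q hq⟩, (hh.1.1) q hq⟩, (hh.1.2) q hq⟩
    · intro hh
      exact ⟨⟨fun q hq => (hh q hq).1.2, fun q hq => (hh q hq).2⟩, fun q hq => (hh q hq).1.1.2⟩
  · rw [if_neg (by rw [notContains_ofList_map]; exact h)]
    symm
    rw [List.map_eq_nil_iff, List.filter_eq_nil_iff]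
    intro y _ hc
    apply h
    unfold noConflict at hc
    simp only [List.all_eq_true, Bool.and_eq_true] at hc ⊢
    intro q hq
    exact (hc q hq).1.1.1
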